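-- pv_equiv track=rewrite | github.com/FlemingH/ROCm-Agent | tools/iterative_agent.py | fix_hip_compat
-- ===== SOURCE A (Python) =====
-- def fix_hip_compat(code: str) -> str:
--     """Fix common CUDA-specific math functions to HIP equivalents."""
--     # CUDA device math intrinsics that don't exist on HIP/RDNA3
--     replacements = {
--         '__tanhf(': 'tanhf(',
--         '__tanh(': 'tanh(',
--         '__sinf(': 'sinf(',
--         '__cosf(': 'cosf(',
--         '__logf(': 'logf(',
--         '__log2f(': 'log2f(',
--         '__sqrtf(': 'sqrtf(',
--         '__powf(': 'powf(',
--     }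
--     for old, new in replacements.items():
--         code = code.replace(old, new)
--     return code
-- ===== SOURCE B (Python) =====
-- import re
--
-- _HIP_INTRINSIC_RE = re.compile(r'__(tanhf|tanh|sinf|cosf|logf|log2f|sqrtf|powf)\(')
--
--
-- def fix_hip_compat(code: str) -> str:
--     """Fix common CUDA-specific math functions to HIP equivalents."""
--     # One left-to-right scan: any "__<name>(" becomes "<name>(".
--     return _HIP_INTRINSIC_RE.sub(r'\1(', code)
-- ===== Notes on version B (the rewrite author's own statement) =====
-- stated objective: idiomatic
-- what changed: The loop of 8 sequential str.replace passes is replaced by a single left-to-right regex scan (re.sub over an alternation of the eight intrinsic names) that rewrites every __<name>( to <name>( in one pass.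
import Mathlib
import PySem

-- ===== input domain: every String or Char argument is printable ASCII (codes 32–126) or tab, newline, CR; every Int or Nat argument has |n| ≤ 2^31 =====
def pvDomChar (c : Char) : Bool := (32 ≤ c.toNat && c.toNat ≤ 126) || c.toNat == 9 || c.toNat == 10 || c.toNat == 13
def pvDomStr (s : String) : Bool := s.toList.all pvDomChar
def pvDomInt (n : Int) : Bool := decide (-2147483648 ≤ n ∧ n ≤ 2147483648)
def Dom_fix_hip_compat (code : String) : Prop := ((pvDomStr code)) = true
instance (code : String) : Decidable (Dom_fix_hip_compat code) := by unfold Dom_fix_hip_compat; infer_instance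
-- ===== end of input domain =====

-- B replaces A's loop of 8 sequential str.replace passes by ONE left-to-right scan
-- (a regex alternation in Source B) that rewrites each "__<name>(" to "<name>(" as it goes.

-- ===== PORT A =====
def fix_hip_compat (code : String) : String :=
  let replacements : List (String × String) :=
    [("__tanhf(", "tanhf("), ("__tanh(", "tanh("), ("__sinf(", "sinf("),
     ("__cosf(", "cosf("), ("__logf(", "logf("), ("__log2f(", "log2f("),
     ("__sqrtf(", "sqrtf("), ("__powf(", "powf(")]
  replacements.foldl (fun code p => PySem.Str.replace code p.1 p.2) code

-- ===== PORT B =====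
-- the compiled alternation __(tanhf|tanh|sinf|cosf|logf|log2f|sqrtf|powf)\( with its \1( replacement:
-- each alternative is (literal pattern, replacement text)
def hipAlts : List (List Char × List Char) :=
  [("__tanhf(".toList, "tanhf(".toList), ("__tanh(".toList, "tanh(".toList),
   ("__sinf(".toList, "sinf(".toList), ("__cosf(".toList, "cosf(".toList),
   ("__logf(".toList, "logf(".toList), ("__log2f(".toList, "log2f(".toList),
   ("__sqrtf(".toList, "sqrtf(".toList), ("__powf(".toList, "powf(".toList)]

-- try the alternatives at the current position, first match wins (regex alternation order)
def tryAlt : List (List Char × List Char) → List Char → Option (List Char × List Char)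
  | [], _ => none
  | (pat, rep) :: alts, l =>
    if pat.isPrefixOf l then some (rep, l.drop pat.length) else tryAlt alts l

-- the single left-to-right scan of re.sub: on a match emit the replacement and jump
-- past the match, otherwise copy one character (fuel = length of the scanned list)
def scanGo : Nat → List Char → List Char
  | 0, l => l
  | _ + 1, [] => []
  | f + 1, c :: t =>
    match tryAlt hipAlts (c :: t) with
    | some (rep, rest) => rep ++ scanGo f rest
    | none => c :: scanGo f t

def fix_hip_compat_alt (code : String) : String :=
  String.ofList (scanGo code.toList.length code.toList)

-- ===== PRECONDITION & SPEC =====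
def Spec_fix_hip_compat (code : String) (out : String) : Prop := out = fix_hip_compat_alt code
instance (code : String) (out : String) : Decidable (Spec_fix_hip_compat code out) := by unfold Spec_fix_hip_compat; infer_instance

-- ===== CLAIM (what is proved, stated in full; the proofs are below) =====
def Claim_equal_fix_hip_compat : Prop := ∀ (code : String), Dom_fix_hip_compat code → Spec_fix_hip_compat code (fix_hip_compat code)

-- ===== LEMMAS AND PROOFS =====

-- the eight patterns, in A's (= B's) order
def pvPats : List (List Char) := hipAlts.map Prod.fst

-- acc-free reformulation of PySem.Chars.replace.go (reasoning vehicle for A's passes)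
def rep (p n : List Char) : Nat → List Char → List Char
  | 0, l => l
  | _ + 1, [] => []
  | f + 1, c :: t =>
    if p.isPrefixOf (c :: t) then n ++ rep p n f (List.drop p.length (c :: t))
    else c :: rep p n f t

theorem go_eq_rep (p n : List Char) :
    ∀ f l acc, PySem.Chars.replace.go p n f l acc = acc.reverse ++ rep p n f l := by
  intro f
  induction f with
  | zero => intro l acc; rfl
  | succ f ih =>
    intro l acc
    cases l with
    | nil => simp [PySem.Chars.replace.go, rep]
    | cons c t =>
      by_cases h : p.isPrefixOf (c :: t)
      · simp only [PySem.Chars.replace.go, rep]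
        rw [if_pos h, if_pos h, ih]
        simp
      · simp only [PySem.Chars.replace.go, rep]
        rw [if_neg h, if_neg h, ih]
        simp

-- a single Python-replace pass, as a structurally transparent function
def REP (p n l : List Char) : List Char := rep p n l.length l

theorem rep_fuel (p n : List Char) (hp : p ≠ []) :
    ∀ f f' l, l.length ≤ f → l.length ≤ f' → rep p n f l = rep p n f' l := by
  intro f
  induction f with
  | zero =>
    intro f' l hl _
    have : l = [] := List.length_eq_zero_iff.mp (Nat.le_zero.mp hl)
    subst this
    cases f' <;> rfl
  | succ f ih =>
    intro f' l hl hl'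
    cases l with
    | nil => cases f' <;> rfl
    | cons c t =>
      obtain ⟨f'', rfl⟩ : ∃ f'', f' = f'' + 1 := by
        cases f' with
        | zero => simp at hl'
        | succ k => exact ⟨k, rfl⟩
      by_cases h : p.isPrefixOf (c :: t)
      · have hple : p.length ≤ (c :: t).length :=
          (List.isPrefixOf_iff_prefix.mp h).length_le
        have hp1 : 1 ≤ p.length := by
          cases p with
          | nil => exact absurd rfl hp
          | cons a b => simp
        simp only [rep, h, if_true]
        have hd : (List.drop p.length (c :: t)).length ≤ f := by
          simp only [List.length_drop, List.length_cons]
          simp only [List.length_cons] at hl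
          omega
        have hd' : (List.drop p.length (c :: t)).length ≤ f'' := by
          simp only [List.length_drop, List.length_cons]
          simp only [List.length_cons] at hl'
          omega
        rw [ih f'' _ hd hd']
      · simp only [rep]
        rw [if_neg h, if_neg h]
        simp only [List.length_cons] at hl hl'
        rw [ih f'' t (by omega) (by omega)]

theorem replace_eq_REP (s p n : List Char) (hp : p ≠ []) :
    PySem.Chars.replace s p n = REP p n s := by
  unfold PySem.Chars.replace
  rw [if_neg (by simpa using hp)]
  simpa using go_eq_rep p n s.length s []

@[simp] theorem REP_nil (p n : List Char) : REP p n [] = [] := rfl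

theorem REP_cons_neg (p n : List Char) (c : Char) (t : List Char) (h : ¬ p <+: c :: t) :
    REP p n (c :: t) = c :: REP p n t := by
  have hb : ¬ p.isPrefixOf (c :: t) = true := by
    rw [List.isPrefixOf_iff_prefix]; exact h
  show rep p n (t.length + 1) (c :: t) = c :: rep p n t.length t
  simp only [rep]
  rw [if_neg hb]

theorem REP_pos (p n l : List Char) (hp : p ≠ []) (h : p <+: l) (hl : l ≠ []) :
    REP p n l = n ++ REP p n (l.drop p.length) := by
  cases l with
  | nil => exact absurd rfl hl
  | cons c t =>
    have hb : p.isPrefixOf (c :: t) = true := List.isPrefixOf_iff_prefix.mpr h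
    have hp1 : 1 ≤ p.length := by
      cases p with
      | nil => exact absurd rfl hp
      | cons a b => simp
    show rep p n (t.length + 1) (c :: t) = n ++ REP p n (List.drop p.length (c :: t))
    simp only [rep, hb, if_true]
    congr 1
    exact rep_fuel p n hp _ _ _ (by simp only [List.length_drop, List.length_cons]; omega)
      (le_of_eq rfl)

-- "a and b disagree at some common index" (kills any prefix relation a <+: b ++ u)
def MM (a b : List Char) : Bool := (a.zip b).any fun q => q.1 != q.2

theorem MM_not_prefix {a b : List Char} (h : MM a b = true) (u : List Char) :
    ¬ a <+: b ++ u := by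
  intro hpre
  rw [MM, List.any_eq_true] at h
  obtain ⟨x, hx, hne⟩ := h
  obtain ⟨i, hi, hget⟩ := List.mem_iff_getElem.mp hx
  have hil : i < a.length := by
    simp only [List.length_zip] at hi; omega
  have hib : i < b.length := by
    simp only [List.length_zip] at hi; omega
  rw [List.getElem_zip] at hget
  have h1 : (b ++ u)[i]'(by simp; omega) = a[i] :=
    (List.IsPrefix.getElem hpre hil).symm
  rw [List.getElem_append_left hib] at h1
  rw [← hget] at hne
  simp at hne
  exact hne (h1.symm)

-- a block x through which pattern q cannot match passes unchanged through a q-pass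
theorem REP_prepend (q rq x : List Char)
    (hx : ∀ x' ∈ x.tails, x' ≠ [] → MM q x' = true) :
    ∀ u, REP q rq (x ++ u) = x ++ REP q rq u := by
  induction x with
  | nil => intro u; simp
  | cons c x'' ih =>
    intro u
    have hnp : ¬ q <+: (c :: x'') ++ u :=
      MM_not_prefix (hx (c :: x'') (by simp [List.mem_tails]) (by simp)) u
    rw [List.cons_append] at hnp ⊢
    rw [REP_cons_neg _ _ _ _ hnp, ih (fun x' hx' hne =>
      hx x' (by
        rw [List.mem_tails] at hx' ⊢
        exact hx'.trans (List.suffix_cons c x'')) hne) u]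
    rfl

-- no suffix of p matching at position 0 can be created by a q-pass
theorem REP_sufpres (q rq : List Char) (hq : q ≠ []) (p : List Char)
    (H : ∀ w ∈ p.tails, w ≠ [] → MM w rq = true) :
    ∀ s, ∀ w ∈ p.tails, w ≠ [] → ¬ w <+: s → ¬ w <+: REP q rq s := by
  intro s
  induction s with
  | nil =>
    intro w _ hw _
    rw [REP_nil]
    intro hpre
    exact hw (List.prefix_nil.mp hpre)
  | cons c t ih =>
    intro w hwmem hwne hnot
    by_cases hqp : q <+: c :: t
    · rw [REP_pos _ _ _ hq hqp (by simp)]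
      exact MM_not_prefix (H w hwmem hwne) _
    · rw [REP_cons_neg _ _ _ _ hqp]
      intro hpre
      cases w with
      | nil => exact hwne rfl
      | cons a w' =>
        rw [List.cons_prefix_cons] at hpre
        obtain ⟨rfl, hw'⟩ := hpre
        cases w' with
        | nil => exact hnot (by simp [List.cons_prefix_cons])
        | cons b w'' =>
          have hmem' : (b :: w'') ∈ p.tails := by
            rw [List.mem_tails] at hwmem ⊢
            exact (List.suffix_cons a (b :: w'')).trans hwmem
          have hnt : ¬ (b :: w'') <+: t := fun hh =>
            hnot (List.cons_prefix_cons.mpr ⟨rfl, hh⟩)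
          exact ih (b :: w'') hmem' (by simp) hnt hw'

-- A's chain of passes, over an arbitrary sublist of patterns (replacement = pattern minus "__")
def AP (qs : List (List Char)) (l : List Char) : List Char :=
  qs.foldl (fun l q => REP q (q.drop 2) l) l

-- the three decidable interference facts about the eight concrete patterns
theorem pats_nonempty : ∀ q ∈ pvPats, q ≠ [] ∧ 7 ≤ q.length := by decide

theorem pats_block_pat : ∀ q ∈ pvPats, ∀ x ∈ pvPats, q ≠ x →
    ∀ x' ∈ x.tails, x' ≠ [] → MM q x' = true := by decide

theorem pats_block_rep : ∀ q ∈ pvPats, ∀ x ∈ pvPats,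
    ∀ x' ∈ (x.drop 2).tails, x' ≠ [] → MM q x' = true := by decide

theorem pats_suf_block : ∀ p ∈ pvPats, ∀ q ∈ pvPats, p ≠ q →
    ∀ w ∈ p.tails, w ≠ [] → MM w (q.drop 2) = true := by decide

-- a replacement text passes unchanged through every remaining pass
theorem AP_repl_front (qs : List (List Char)) (hqs : ∀ q ∈ qs, q ∈ pvPats)
    (pq : List Char) (hpq : pq ∈ pvPats) :
    ∀ u, AP qs (pq.drop 2 ++ u) = pq.drop 2 ++ AP qs u := by
  induction qs with
  | nil => intro u; rfl
  | cons q qs' ih =>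
    intro u
    have hq : q ∈ pvPats := hqs q (by simp)
    show AP qs' (REP q (q.drop 2) (pq.drop 2 ++ u)) = pq.drop 2 ++ AP qs' (REP q (q.drop 2) u)
    rw [REP_prepend q (q.drop 2) (pq.drop 2) (pats_block_rep q hq pq hpq)]
    exact ih (fun r hr => hqs r (by simp [hr])) _

-- a pattern at the front is rewritten exactly once by the chain containing its pass
theorem AP_pat_front (qs : List (List Char)) (hqs : ∀ q ∈ qs, q ∈ pvPats)
    (hnd : qs.Nodup) (pq : List Char) (hpq : pq ∈ pvPats) (hin : pq ∈ qs) :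
    ∀ u, AP qs (pq ++ u) = pq.drop 2 ++ AP qs u := by
  induction qs with
  | nil => cases hin
  | cons q qs' ih =>
    intro u
    have hq : q ∈ pvPats := hqs q (by simp)
    have hqne : q ≠ [] := (pats_nonempty q hq).1
    by_cases he : q = pq
    · subst he
      show AP qs' (REP q (q.drop 2) (q ++ u)) = q.drop 2 ++ AP qs' (REP q (q.drop 2) u)
      rw [REP_pos q (q.drop 2) (q ++ u) hqne (List.prefix_append q u)
        (by cases q with | nil => exact absurd rfl hqne | cons a b => simp),
        List.drop_left]
      exact AP_repl_front qs' (fun r hr => hqs r (by simp [hr])) q hq _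
    · have hin' : pq ∈ qs' := by
        rcases List.mem_cons.mp hin with h | h
        · exact absurd h.symm he
        · exact h
      show AP qs' (REP q (q.drop 2) (pq ++ u)) = pq.drop 2 ++ AP qs' (REP q (q.drop 2) u)
      rw [REP_prepend q (q.drop 2) pq (pats_block_pat q hq pq hpq he)]
      exact ih (fun r hr => hqs r (by simp [hr])) (List.Nodup.of_cons hnd) hin' _

-- when no pattern matches at the front, the head character passes through the chain
theorem AP_cons_nomatch (qs : List (List Char)) (hqs : ∀ q ∈ qs, q ∈ pvPats)
    (hnd : qs.Nodup) :
    ∀ (c : Char) (t : List Char), (∀ q ∈ qs, ¬ q <+: c :: t) →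
      AP qs (c :: t) = c :: AP qs t := by
  induction qs with
  | nil => intro c t _; rfl
  | cons q qs' ih =>
    intro c t h
    have hq : q ∈ pvPats := hqs q (by simp)
    have hqne : q ≠ [] := (pats_nonempty q hq).1
    have hstep : REP q (q.drop 2) (c :: t) = c :: REP q (q.drop 2) t :=
      REP_cons_neg _ _ _ _ (h q (by simp))
    have hpres : ∀ q' ∈ qs', ¬ q' <+: c :: REP q (q.drop 2) t := by
      intro q' hq'
      have hq'p : q' ∈ pvPats := hqs q' (by simp [hq'])
      have hne : q' ≠ q := by
        intro he
        subst he
        exact (List.nodup_cons.mp hnd).1 hq'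
      have := REP_sufpres q (q.drop 2) hqne q'
        (pats_suf_block q' hq'p q hq hne) (c :: t) q'
        (by simp [List.mem_tails]) (pats_nonempty q' hq'p).1 (h q' (by simp [hq']))
      rwa [hstep] at this
    show AP qs' (REP q (q.drop 2) (c :: t)) = c :: AP qs' (REP q (q.drop 2) t)
    rw [hstep]
    exact ih (fun r hr => hqs r (by simp [hr])) (List.Nodup.of_cons hnd) c _ hpres


-- what a successful / failed probe of the alternation says
theorem tryAlt_some {l rp rest : List Char} (h : tryAlt hipAlts l = some (rp, rest)) :
    rest.length + 7 ≤ l.length ∧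
      ∃ pat ∈ pvPats, rp = pat.drop 2 ∧ pat <+: l ∧ rest = l.drop pat.length := by
  simp only [hipAlts, tryAlt] at h
  split_ifs at h with h1 h2 h3 h4 h5 h6 h7 h8
  · rw [Option.some.injEq, Prod.mk.injEq] at h
    obtain ⟨e1, e2⟩ := h
    subst e2
    have hle := (List.isPrefixOf_iff_prefix.mp h1).length_le
    have h7p : 7 ≤ "__tanhf(".toList.length := by decide
    exact ⟨by simp only [List.length_drop]; omega,
      "__tanhf(".toList, by decide, by rw [← e1]; decide,
      List.isPrefixOf_iff_prefix.mp h1, rfl⟩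
  · rw [Option.some.injEq, Prod.mk.injEq] at h
    obtain ⟨e1, e2⟩ := h
    subst e2
    have hle := (List.isPrefixOf_iff_prefix.mp h2).length_le
    have h7p : 7 ≤ "__tanh(".toList.length := by decide
    exact ⟨by simp only [List.length_drop]; omega,
      "__tanh(".toList, by decide, by rw [← e1]; decide,
      List.isPrefixOf_iff_prefix.mp h2, rfl⟩
  · rw [Option.some.injEq, Prod.mk.injEq] at h
    obtain ⟨e1, e2⟩ := h
    subst e2
    have hle := (List.isPrefixOf_iff_prefix.mp h3).length_le
    have h7p : 7 ≤ "__sinf(".toList.length := by decide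
    exact ⟨by simp only [List.length_drop]; omega,
      "__sinf(".toList, by decide, by rw [← e1]; decide,
      List.isPrefixOf_iff_prefix.mp h3, rfl⟩
  · rw [Option.some.injEq, Prod.mk.injEq] at h
    obtain ⟨e1, e2⟩ := h
    subst e2
    have hle := (List.isPrefixOf_iff_prefix.mp h4).length_le
    have h7p : 7 ≤ "__cosf(".toList.length := by decide
    exact ⟨by simp only [List.length_drop]; omega,
      "__cosf(".toList, by decide, by rw [← e1]; decide,
      List.isPrefixOf_iff_prefix.mp h4, rfl⟩
  · rw [Option.some.injEq, Prod.mk.injEq] at h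
    obtain ⟨e1, e2⟩ := h
    subst e2
    have hle := (List.isPrefixOf_iff_prefix.mp h5).length_le
    have h7p : 7 ≤ "__logf(".toList.length := by decide
    exact ⟨by simp only [List.length_drop]; omega,
      "__logf(".toList, by decide, by rw [← e1]; decide,
      List.isPrefixOf_iff_prefix.mp h5, rfl⟩
  · rw [Option.some.injEq, Prod.mk.injEq] at h
    obtain ⟨e1, e2⟩ := h
    subst e2
    have hle := (List.isPrefixOf_iff_prefix.mp h6).length_le
    have h7p : 7 ≤ "__log2f(".toList.length := by decide
    exact ⟨by simp only [List.length_drop]; omega,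
      "__log2f(".toList, by decide, by rw [← e1]; decide,
      List.isPrefixOf_iff_prefix.mp h6, rfl⟩
  · rw [Option.some.injEq, Prod.mk.injEq] at h
    obtain ⟨e1, e2⟩ := h
    subst e2
    have hle := (List.isPrefixOf_iff_prefix.mp h7).length_le
    have h7p : 7 ≤ "__sqrtf(".toList.length := by decide
    exact ⟨by simp only [List.length_drop]; omega,
      "__sqrtf(".toList, by decide, by rw [← e1]; decide,
      List.isPrefixOf_iff_prefix.mp h7, rfl⟩
  · rw [Option.some.injEq, Prod.mk.injEq] at h
    obtain ⟨e1, e2⟩ := h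
    subst e2
    have hle := (List.isPrefixOf_iff_prefix.mp h8).length_le
    have h7p : 7 ≤ "__powf(".toList.length := by decide
    exact ⟨by simp only [List.length_drop]; omega,
      "__powf(".toList, by decide, by rw [← e1]; decide,
      List.isPrefixOf_iff_prefix.mp h8, rfl⟩

theorem tryAlt_none {l : List Char} (h : tryAlt hipAlts l = none) :
    ∀ q ∈ pvPats, ¬ q <+: l := by
  simp only [hipAlts, tryAlt] at h
  split_ifs at h with h1 h2 h3 h4 h5 h6 h7 h8
  intro q hq
  simp only [pvPats, hipAlts, List.map, List.mem_cons] at hq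
  rw [← List.isPrefixOf_iff_prefix]
  rcases hq with rfl | rfl | rfl | rfl | rfl | rfl | rfl | rfl | hq
  · simpa using h1
  · simpa using h2
  · simpa using h3
  · simpa using h4
  · simpa using h5
  · simpa using h6
  · simpa using h7
  · simpa using h8
  · cases hq

-- fuel does not matter for the scan as long as it covers the list
theorem scanGo_fuel : ∀ f f' (l : List Char), l.length ≤ f → l.length ≤ f' →
    scanGo f l = scanGo f' l := by
  intro f
  induction f with
  | zero =>
    intro f' l hl _
    have : l = [] := List.length_eq_zero_iff.mp (Nat.le_zero.mp hl)
    subst this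
    cases f' <;> rfl
  | succ f ih =>
    intro f' l hl hl'
    cases l with
    | nil => cases f' <;> rfl
    | cons c t =>
      obtain ⟨f'', rfl⟩ : ∃ f'', f' = f'' + 1 := by
        cases f' with
        | zero => simp at hl'
        | succ k => exact ⟨k, rfl⟩
      show scanGo (f + 1) (c :: t) = scanGo (f'' + 1) (c :: t)
      simp only [scanGo]
      cases hma : tryAlt hipAlts (c :: t) with
      | none =>
        simp only [List.length_cons] at hl hl'
        rw [ih f'' t (by omega) (by omega)]
      | some pr =>
        obtain ⟨rp, rest⟩ := pr
        have hrest : rest.length + 7 ≤ (c :: t).length := (tryAlt_some hma).1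
        simp only [List.length_cons] at hl hl' hrest
        show rp ++ scanGo f rest = rp ++ scanGo f'' rest
        rw [ih f'' rest (by omega) (by omega)]

def SCAN (l : List Char) : List Char := scanGo l.length l

-- the heart: A's full chain of eight passes equals B's single scan
theorem AP_eq_SCAN : ∀ f (l : List Char), l.length ≤ f → AP pvPats l = SCAN l := by
  intro f
  induction f with
  | zero =>
    intro l hl
    have : l = [] := List.length_eq_zero_iff.mp (Nat.le_zero.mp hl)
    subst this
    rfl
  | succ f ih =>
    intro l hl
    cases l with
    | nil => rfl
    | cons c t =>
      show AP pvPats (c :: t) = scanGo (t.length + 1) (c :: t)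
      simp only [scanGo]
      cases hma : tryAlt hipAlts (c :: t) with
      | none =>
        -- no pattern matches at the front
        have hnom : ∀ q ∈ pvPats, ¬ q <+: c :: t := tryAlt_none hma
        rw [AP_cons_nomatch pvPats (fun q hq => hq) (by decide) c t hnom]
        simp only [List.length_cons] at hl
        rw [ih t (by omega)]
        rfl
      | some pr =>
        obtain ⟨rp, rest⟩ := pr
        -- some alternative (pat, rp) matched: extract which one and rewrite both sides
        obtain ⟨hlen7, pat, hpm, hrp, hpre, hrest⟩ := tryAlt_some hma
        show AP pvPats (c :: t) = rp ++ scanGo t.length rest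
        obtain ⟨u, hu⟩ := hpre
        have hu2 : pat ++ rest = c :: t := by rw [hrest, ← hu, List.drop_left]
        rw [← hu2, AP_pat_front pvPats (fun q hq => hq) (by decide) pat hpm hpm rest, hrp]
        congr 1
        have h7le : 7 ≤ pat.length := (pats_nonempty pat hpm).2
        have h2 : (pat ++ rest).length ≤ f + 1 := by rw [hu2]; exact hl
        have h3 : (pat ++ rest).length = t.length + 1 := by rw [hu2]; rfl
        simp only [List.length_append] at h2 h3
        rw [ih rest (by omega)]
        exact scanGo_fuel rest.length t.length rest le_rfl (by omega)

-- A's string-level fold is the char-level chain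
theorem fix_hip_compat_eq_AP (code : String) :
    fix_hip_compat code = String.ofList (AP pvPats code.toList) := by
  have e1 : "__tanhf(".toList.drop 2 = "tanhf(".toList := by decide
  have e2 : "__tanh(".toList.drop 2 = "tanh(".toList := by decide
  have e3 : "__sinf(".toList.drop 2 = "sinf(".toList := by decide
  have e4 : "__cosf(".toList.drop 2 = "cosf(".toList := by decide
  have e5 : "__logf(".toList.drop 2 = "logf(".toList := by decide
  have e6 : "__log2f(".toList.drop 2 = "log2f(".toList := by decide
  have e7 : "__sqrtf(".toList.drop 2 = "sqrtf(".toList := by decide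
  have e8 : "__powf(".toList.drop 2 = "powf(".toList := by decide
  unfold fix_hip_compat AP pvPats hipAlts
  simp only [List.foldl, List.map, PySem.Str.replace, String.toList_ofList]
  rw [replace_eq_REP _ _ _ (by decide), replace_eq_REP _ _ _ (by decide),
    replace_eq_REP _ _ _ (by decide), replace_eq_REP _ _ _ (by decide),
    replace_eq_REP _ _ _ (by decide), replace_eq_REP _ _ _ (by decide),
    replace_eq_REP _ _ _ (by decide), replace_eq_REP _ _ _ (by decide)]
  rw [e1, e2, e3, e4, e5, e6, e7, e8]

-- ===== VERDICT (by name: the statement is the Claim_ definition above) =====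
theorem fix_hip_compat_spec : Claim_equal_fix_hip_compat := by
  intro code _
  show fix_hip_compat code = fix_hip_compat_alt code
  rw [fix_hip_compat_eq_AP]
  unfold fix_hip_compat_alt
  exact congrArg String.ofList (AP_eq_SCAN code.toList.length code.toList le_rfl)
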